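-- pv_equiv track=rewrite | github.com/NigeloYang/federated_learning_differential_privacy | algorithm/nowcoderH200/array/67-sortCowsII.py | sortCows2
-- ===== SOURCE A (Python) =====
-- from typing import List
--
-- def sortCows2(cows: List[int]) -> List[int]:
--     if not cows:
--         return []
--
--     l, r = 0, len(cows) - 1
--     ans = [0] * len(cows)
--     for i in range(len(cows)):
--         if cows[i] == 0:
--             l += 1
--         elif cows[i] == 2:
--             ans[r] = 2
--             r -= 1
--
--     while l <= r:
--         ans[l] = 1
--         l += 1
--     return ans
-- ===== SOURCE B (Python) =====
-- from typing import List
--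
-- def sortCows2(cows: List[int]) -> List[int]:
--     c0 = cows.count(0)
--     c2 = cows.count(2)
--     return [0] * c0 + [1] * (len(cows) - c0 - c2) + [2] * c2
-- ===== Notes on version B (the rewrite author's own statement) =====
-- stated objective: simpler
-- what changed: Replaces the two-pointer scatter pass (writing 2s from the right into a zero-filled array, then a while loop filling 1s) with counting 0s and 2s and concatenating three replicated runs; non-{0,2} values are still absorbed into the middle run.
import Mathlib
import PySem

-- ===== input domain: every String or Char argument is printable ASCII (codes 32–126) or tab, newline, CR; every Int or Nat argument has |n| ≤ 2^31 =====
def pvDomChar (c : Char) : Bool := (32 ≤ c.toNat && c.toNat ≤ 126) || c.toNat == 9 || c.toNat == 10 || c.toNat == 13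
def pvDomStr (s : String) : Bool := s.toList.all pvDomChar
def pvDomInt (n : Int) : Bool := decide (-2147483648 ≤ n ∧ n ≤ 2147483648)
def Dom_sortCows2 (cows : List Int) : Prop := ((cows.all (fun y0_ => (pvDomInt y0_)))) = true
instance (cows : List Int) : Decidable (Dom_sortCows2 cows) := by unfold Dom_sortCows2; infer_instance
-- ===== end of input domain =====

-- B replaces A's two-pointer scatter (2s written right-to-left into a zero array, then a
-- while loop filling 1s) by counting 0s and 2s and concatenating three replicated runs;
-- objective: simpler.

-- ===== PORT A =====
-- A's for loop: state (l, r, ans), 0s bump l, 2s are written at ans[r] and r moves left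
def scatterA (cows : List Int) : Int × Int × List Int :=
  cows.foldl
    (fun (st : Int × Int × List Int) c =>
      if c = 0 then (st.1 + 1, st.2.1, st.2.2)
      else if c = 2 then (st.1, st.2.1 - 1, PySem.List.pySetD st.2.2 st.2.1 2)
      else st)
    (0, (cows.length : Int) - 1, List.replicate cows.length 0)

-- A's trailing 'while l <= r: ans[l] = 1; l += 1' loop
def fillOnes (l r : Int) (ans : List Int) : List Int :=
  if l ≤ r then fillOnes (l + 1) r (PySem.List.pySetD ans l 1) else ans
termination_by (r + 1 - l).toNat
decreasing_by omega

def sortCows2 (cows : List Int) : List Int :=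
  if cows = [] then []
  else fillOnes (scatterA cows).1 (scatterA cows).2.1 (scatterA cows).2.2

-- ===== PORT B =====
def sortCows2_alt (cows : List Int) : List Int :=
  List.replicate (PySem.List.count cows 0) 0
    ++ List.replicate (cows.length - PySem.List.count cows 0 - PySem.List.count cows 2) 1
    ++ List.replicate (PySem.List.count cows 2) 2

-- ===== PRECONDITION & SPEC =====
def Spec_sortCows2 (cows : List Int) (out : List Int) : Prop := out = sortCows2_alt cows
instance (cows : List Int) (out : List Int) : Decidable (Spec_sortCows2 cows out) := by unfold Spec_sortCows2; infer_instance

-- ===== CLAIM (what is proved, stated in full; the proofs are below) =====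
def Claim_equal_sortCows2 : Prop := ∀ (cows : List Int), Dom_sortCows2 cows → Spec_sortCows2 cows (sortCows2 cows)

-- ===== LEMMAS AND PROOFS =====

lemma count_zero_two_le (xs : List Int) : List.count 0 xs + List.count 2 xs ≤ xs.length := by
  induction xs with
  | nil => simp
  | cons c xs ih =>
    simp only [List.count_cons, List.length_cons]
    by_cases h0 : c = 0 <;> by_cases h2 : c = 2 <;> simp [h0, h2] at * <;> omega

lemma set_repl (a t : Nat) :
    (List.replicate (a + 1) (0 : Int) ++ List.replicate t 2).set a 2
      = List.replicate a 0 ++ List.replicate (t + 1) 2 := by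
  induction a with
  | zero => simp [List.replicate_succ]
  | succ a ih =>
    have h1 : (List.replicate (a + 1 + 1) (0:Int) ++ List.replicate t 2)
        = 0 :: (List.replicate (a + 1) 0 ++ List.replicate t 2) := by
      simp [List.replicate_succ]
    rw [h1, List.set_cons_succ, ih]
    simp [List.replicate_succ]

lemma set_at_len (P rest : List Int) (x v : Int) :
    (P ++ x :: rest).set P.length v = P ++ v :: rest := by
  induction P with
  | nil => rfl
  | cons p P ih => simp [ih]

lemma fold_invariant (xs : List Int) : ∀ (n z t : Nat), t + List.count 2 xs ≤ n →
    xs.foldl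
      (fun (st : Int × Int × List Int) c =>
        if c = 0 then (st.1 + 1, st.2.1, st.2.2)
        else if c = 2 then (st.1, st.2.1 - 1, PySem.List.pySetD st.2.2 st.2.1 2)
        else st)
      ((z : Int), (n : Int) - 1 - t, List.replicate (n - t) 0 ++ List.replicate t 2)
    = (((z + List.count 0 xs : Nat) : Int), (n : Int) - 1 - ((t + List.count 2 xs : Nat) : Int),
        List.replicate (n - (t + List.count 2 xs)) 0 ++ List.replicate (t + List.count 2 xs) 2) := by
  induction xs with
  | nil => intro n z t h; simp
  | cons c xs ih =>
    intro n z t h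
    simp only [List.foldl_cons]
    by_cases h0 : c = 0
    · subst h0
      rw [if_pos rfl]
      have := ih n (z + 1) t (by simp at h ⊢; omega)
      rw [show ((z : Int) + 1) = ((z + 1 : Nat) : Int) by omega, this]
      simp only [List.count_cons]
      norm_num
      push_cast; ring
    · by_cases h2 : c = 2
      · subst h2
        have hcnt : t + 1 + List.count 2 xs ≤ n := by simp at h; omega
        have hset : PySem.List.pySetD (List.replicate (n - t) (0:Int) ++ List.replicate t 2)
            ((n : Int) - 1 - t) 2
            = List.replicate (n - (t + 1)) 0 ++ List.replicate (t + 1) 2 := by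
          rw [PySem.List.pySetD_of_nonneg _ _ (by omega)]
          have ha : n - t = (n - (t + 1)) + 1 := by omega
          have hidx : ((n : Int) - 1 - t).toNat = n - (t + 1) := by omega
          rw [hidx, ha, set_repl]
        rw [if_neg h0, if_pos rfl]
        rw [hset]
        have hr : (n : Int) - 1 - (t : Int) - 1 = (n : Int) - 1 - ((t + 1 : Nat) : Int) := by
          push_cast; ring
        rw [hr, ih n z (t + 1) hcnt]
        simp only [List.count_cons]
        norm_num
        have hassoc : t + 1 + List.count 2 xs = t + (List.count 2 xs + 1) := by omega
        rw [hassoc]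
        constructor
        · push_cast; ring
        · rfl
      · rw [if_neg h0, if_neg h2]
        rw [ih n z t (by simp [h2] at h ⊢; omega)]
        simp [h0, h2]

lemma fill_spec (k : Nat) : ∀ (l : Int) (P S : List Int), 0 ≤ l → P.length = l.toNat →
    fillOnes l (l + k - 1) (P ++ List.replicate k 0 ++ S) = P ++ List.replicate k 1 ++ S := by
  induction k with
  | zero =>
    intro l P S hl hP
    rw [fillOnes]
    simp
  | succ k ih =>
    intro l P S hl hP
    rw [fillOnes, if_pos (by omega)]
    have hset : PySem.List.pySetD (P ++ List.replicate (k + 1) (0:Int) ++ S) l 1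
        = (P ++ [1]) ++ List.replicate k 0 ++ S := by
      rw [PySem.List.pySetD_of_nonneg _ _ hl, ← hP]
      simp only [List.replicate_succ, List.append_assoc, List.cons_append]
      rw [set_at_len]
      simp
    rw [hset]
    have harg : l + ((k : Nat) + 1) - 1 = (l + 1) + (k : Nat) - 1 := by ring
    rw [show ((k + 1 : Nat) : Int) = (k : Nat) + 1 by push_cast; ring, harg,
      ih (l + 1) (P ++ [1]) S (by omega) (by simp [hP]; omega)]
    simp [List.replicate_succ]

lemma scatterA_eq (cows : List Int) :
    scatterA cows = ((List.count 0 cows : Int),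
      (cows.length : Int) - 1 - (List.count 2 cows : Int),
      List.replicate (cows.length - List.count 2 cows) 0
        ++ List.replicate (List.count 2 cows) 2) := by
  unfold scatterA
  have h := fold_invariant cows cows.length 0 0 (by
    have := count_zero_two_le cows; omega)
  simpa using h

-- ===== VERDICT (by name: the statement is the Claim_ definition above) =====
theorem sortCows2_spec : Claim_equal_sortCows2 := by
  intro cows _
  unfold Spec_sortCows2
  by_cases hnil : cows = []
  · subst hnil; decide
  · unfold sortCows2 sortCows2_alt
    rw [if_neg hnil, scatterA_eq]
    simp only [PySem.List.count_eq]
    have hle : List.count 0 cows + List.count 2 cows ≤ cows.length := count_zero_two_le cows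
    have hsplit : List.replicate (cows.length - List.count 2 cows) (0:Int)
        = List.replicate (List.count 0 cows) 0
          ++ List.replicate (cows.length - List.count 2 cows - List.count 0 cows) 0 := by
      rw [← List.replicate_add]; congr 1; omega
    have hr : (cows.length : Int) - 1 - (List.count 2 cows : Int)
        = (List.count 0 cows : Int)
          + ((cows.length - List.count 2 cows - List.count 0 cows : Nat) : Int) - 1 := by
      omega
    rw [hsplit, hr,
      fill_spec (cows.length - List.count 2 cows - List.count 0 cows) (List.count 0 cows)
        (List.replicate (List.count 0 cows) 0) (List.replicate (List.count 2 cows) 2)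
        (by omega) (by simp)]
    have hmid : cows.length - List.count 2 cows - List.count 0 cows
        = cows.length - List.count 0 cows - List.count 2 cows := by omega
    rw [hmid]
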